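-- pv_equiv track=rewrite | github.com/TEPEN-CHAN/AES-128bit-PYTHON | PRAK-03.2(Arsitektur Program Untuk Permutasi).py | generate_arrangements
-- ===== SOURCE A (Python) =====
-- import itertools
-- import itertools
--
-- def generate_arrangements(n, r):
--     """
--     Menghasilkan semua cara mengatur n buku ke dalam r bagian rak.
--
--     Args:
--         n (int): Jumlah buku.
--         r (int): Jumlah bagian rak.
--
--     Returns:
--         List[List[List[str]]]: List dari semua pengaturan,
--                                di mana setiap pengaturan adalah list
--                                yang berisi r sublist buku.
--     """
--     # Membuat daftar buku
--     books = [f"Book{i+1}" for i in range(n)]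
--
--     # Membuat daftar bagian rak
--     sections = [f"Section{j+1}" for j in range(r)]
--
--     # Menghasilkan semua kombinasi penempatan buku ke bagian rak
--     # itertools.product menghasilkan Cartesian product dari r pilihan untuk setiap buku
--     all_combinations = itertools.product(range(r), repeat=n)
--
--     arrangements = []
--
--     for combination in all_combinations:
--         # Inisialisasi list untuk setiap bagian rak
--         current_arrangement = [[] for _ in range(r)]
--
--         # Menempatkan setiap buku ke bagian rak yang ditentukan oleh kombinasi
--         for book, section_index in zip(books, combination):
--             current_arrangement[section_index].append(book)
--
--         arrangements.append(current_arrangement)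
--
--     return arrangements
-- ===== SOURCE B (Python) =====
-- def generate_arrangements(n, r):
--     """Builds the arrangements level by level: fold over the books, extending
--     every partial arrangement with the current book placed in each section in
--     turn.  Sections are kept as persistent linked chains (newest book first) so
--     extending a partial costs O(r); they are materialised into lists at the end."""
--     books = [f"Book{i+1}" for i in range(n)]
--     # a chain is None (empty) or a pair (book, rest); one chain per section
--     partials = [tuple(None for _ in range(r))]
--     for book in books:
--         partials = [p[:j] + ((book, p[j]),) + p[j + 1:]
--                     for p in partials for j in range(r)]
--
--     def to_list(chain):
--         out = []
--         while chain is not None: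
--             out.append(chain[0])
--             chain = chain[1]
--         out.reverse()
--         return out
--
--     return [[to_list(chain) for chain in p] for p in partials]
-- ===== Notes on version B (the rewrite author's own statement) =====
-- stated objective: alternative
-- what changed: Replaces itertools.product over index tuples plus a per-tuple placement loop by a level-by-level fold over the books that extends every partial arrangement with the current book in each section, holding sections as persistent linked chains (O(1) extension, no deep recursion) materialised into lists at the end.
import Mathlib
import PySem

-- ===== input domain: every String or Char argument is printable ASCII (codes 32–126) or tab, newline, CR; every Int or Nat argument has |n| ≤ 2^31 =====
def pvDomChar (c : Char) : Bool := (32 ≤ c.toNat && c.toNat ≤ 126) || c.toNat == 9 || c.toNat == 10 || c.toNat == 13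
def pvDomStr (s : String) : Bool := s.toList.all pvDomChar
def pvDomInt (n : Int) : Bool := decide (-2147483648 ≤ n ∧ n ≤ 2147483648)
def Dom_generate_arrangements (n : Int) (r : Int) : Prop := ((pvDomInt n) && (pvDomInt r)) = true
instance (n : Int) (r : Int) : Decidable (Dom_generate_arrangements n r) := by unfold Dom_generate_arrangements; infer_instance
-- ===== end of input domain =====

-- B replaces itertools.product + per-tuple placement by a level-by-level fold that extends each partial arrangement book by book, with sections as persistent chains (alternative decomposition, same cost).


-- ===== PORT A =====
-- itertools.product(range r, repeat = k): first component varies slowest (lexicographic), exact order.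
def pvProdRange (r : Int) : Nat → List (List Int)
  | 0 => [[]]
  | k + 1 => (PySem.List.pyRange 0 r 1).flatMap (fun c => (pvProdRange r k).map (fun t => c :: t))

-- current_arrangement[section_index].append(book); section_index comes from range(r), so it is a valid nonneg index.
def pvAppendAt (st : List (List String)) (i : Int) (b : String) : List (List String) :=
  st.set i.toNat ((st.getD i.toNat []) ++ [b])

def generate_arrangements (n : Int) (r : Int) : List (List (List String)) :=
  let books := (PySem.List.pyRange 0 n 1).map (fun i => "Book" ++ PySem.Int.toStr (i + 1))
  let all_combinations := pvProdRange r n.toNat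
  all_combinations.map (fun combination =>
    let current_arrangement := (PySem.List.pyRange 0 r 1).map (fun _ => ([] : List String))
    (books.zip combination).foldl (fun cur p => pvAppendAt cur p.2 p.1) current_arrangement)

-- ===== PORT B =====
-- a chain (book, rest) is a List String holding the section's books newest-first; p[:j] + ((book, p[j]),) + p[j+1:]
def pvPlaceRev (p : List (List String)) (j : Int) (b : String) : List (List String) :=
  p.set j.toNat (b :: p.getD j.toNat [])

def generate_arrangements_alt (n : Int) (r : Int) : List (List (List String)) :=
  let books := (PySem.List.pyRange 0 n 1).map (fun i => "Book" ++ PySem.Int.toStr (i + 1))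
  let partials := books.foldl
    (fun ps b => ps.flatMap (fun p => (PySem.List.pyRange 0 r 1).map (fun j => pvPlaceRev p j b)))
    [(PySem.List.pyRange 0 r 1).map (fun _ => ([] : List String))]
  -- to_list walks a chain newest-first and reverses, i.e. List.reverse
  partials.map (fun p => p.map (fun chain => chain.reverse))

-- ===== PRECONDITION & SPEC =====
-- 0 ≤ n: for n < 0 Python's itertools.product(…, repeat=n) raises ValueError, so A returns nothing there.
def Pre_generate_arrangements (n : Int) (r : Int) : Prop := 0 ≤ n
instance (n : Int) (r : Int) : Decidable (Pre_generate_arrangements n r) := by unfold Pre_generate_arrangements; infer_instance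
def pvWitness_generate_arrangements : Int × Int := (2, 2)

def Spec_generate_arrangements (n : Int) (r : Int) (out : List (List (List String))) : Prop := out = generate_arrangements_alt n r
instance (n : Int) (r : Int) (out : List (List (List String))) : Decidable (Spec_generate_arrangements n r out) := by unfold Spec_generate_arrangements; infer_instance

-- ===== CLAIM (what is proved, stated in full; the proofs are below) =====
def Claim_equal_generate_arrangements : Prop := ∀ (n : Int) (r : Int), Dom_generate_arrangements n r → Pre_generate_arrangements n r → Spec_generate_arrangements n r (generate_arrangements n r)

-- ===== LEMMAS AND PROOFS =====

-- The level-by-level fold enumerates exactly product's tuples, each placed by a fold from its start state.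
theorem pvFold_eq_flatMap_prod (r : Int) (bs : List String) (P : List (List (List String))) :
    bs.foldl
        (fun ps b => ps.flatMap (fun p => (PySem.List.pyRange 0 r 1).map (fun j => pvPlaceRev p j b))) P
      = P.flatMap (fun st => (pvProdRange r bs.length).map (fun comb =>
          (bs.zip comb).foldl (fun cur q => pvPlaceRev cur q.2 q.1) st)) := by
  induction bs generalizing P with
  | nil => simp [pvProdRange]
  | cons b bs ih =>
    rw [List.foldl_cons, ih]
    simp only [List.flatMap_assoc, List.length_cons, pvProdRange, List.map_flatMap,
      List.map_map, List.flatMap_map]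
    refine List.flatMap_congr (fun st _ => ?_)
    refine List.flatMap_congr (fun c _ => ?_)
    exact List.map_congr_left (fun comb _ => by simp [List.zip_cons_cons, List.foldl_cons])

-- One placement step commutes with reversing every section chain.
theorem pvPlaceRev_map_reverse (st : List (List String)) (j : Int) (b : String) :
    (pvPlaceRev st j b).map List.reverse = pvAppendAt (st.map List.reverse) j b := by
  unfold pvPlaceRev pvAppendAt
  rw [List.map_set]
  by_cases h : j.toNat < st.length
  · simp [List.getD_eq_getElem?_getD, List.getElem?_map, h, List.getElem?_eq_getElem]
  · simp [List.getD_eq_getElem?_getD, List.getElem?_map, List.getElem?_eq_none (by omega : st.length ≤ j.toNat)]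

-- Reversing the chains after a placement fold gives the append-placement fold.
theorem pvFoldPlace_map_reverse (l : List (String × Int)) (st : List (List String)) :
    (l.foldl (fun cur q => pvPlaceRev cur q.2 q.1) st).map List.reverse
      = l.foldl (fun cur q => pvAppendAt cur q.2 q.1) (st.map List.reverse) := by
  induction l generalizing st with
  | nil => rfl
  | cons q l ih => rw [List.foldl_cons, List.foldl_cons, ih, pvPlaceRev_map_reverse]

theorem generate_arrangements_spec : Claim_equal_generate_arrangements := by
  intro n r _ hn
  have hn' : 0 ≤ n := hn
  unfold Spec_generate_arrangements
  dsimp only [generate_arrangements, generate_arrangements_alt]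
  have hlen : ((PySem.List.pyRange 0 n 1).map (fun i => "Book" ++ PySem.Int.toStr (i + 1))).length = n.toNat := by
    simp [PySem.List.pyRange]
    omega
  rw [pvFold_eq_flatMap_prod, hlen]
  simp only [List.flatMap_singleton', List.flatMap_cons, List.flatMap_nil, List.append_nil,
    List.map_map, Function.comp_def]
  refine List.map_congr_left (fun comb _ => ?_)
  rw [pvFoldPlace_map_reverse]
  congr 1
  simp
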